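-- pv_equiv track=rewrite | github.com/zensii/SoftUni_Python | Python_Fundamentals/Text_Processing/Exercise/test.py | process_rage_message
-- ===== SOURCE A (Python) =====
-- def process_rage_message(message):
--     unique_chars = set()
--     rage_message = {}
--     current_char_set = ''
--     index = 0
--     current_num = ''
--     while index < len(message):
--         if message[index].isdigit():
--             while index < len(message) and message[index].isdigit():
--                 current_num += message[index]
--                 index += 1
--             rage_message[current_char_set] = int(current_num)
--             current_char_set = ''
--             current_num = ''
--         else:
--             unique_chars.add(message[index].upper())
--             current_char_set += message[index].upper()
--             index += 1
--
--     return unique_chars, rage_message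
-- ===== SOURCE B (Python) =====
-- def _runs(message):
--     """Tokenize message into maximal runs of digits / non-digits: list of (is_digit, run_string)."""
--     runs = []
--     cur = []
--     cur_isd = False
--     for ch in message:
--         isd = ch.isdigit()
--         if cur and isd == cur_isd:
--             cur.append(ch)
--         else:
--             if cur:
--                 runs.append((cur_isd, ''.join(cur)))
--             cur = [ch]
--             cur_isd = isd
--     if cur:
--         runs.append((cur_isd, ''.join(cur)))
--     return runs
--
--
-- def process_rage_message(message):
--     unique_chars = set()
--     rage_message = {}
--     key = ''
--     for isd, run in _runs(message):
--         if isd: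
--             rage_message[key] = int(run)
--             key = ''
--         else:
--             key = run.upper()
--             unique_chars.update(key)
--     return unique_chars, rage_message
-- ===== Notes on version B (the rewrite author's own statement) =====
-- stated objective: faster
-- what changed: A's single index-driven walk with a nested inner while that grows strings by repeated concatenation is replaced by a two-phase pass: tokenize the message into maximal digit/non-digit runs (accumulated as char lists and joined once), then fold once over the run list handling each whole run at a time.
import Mathlib
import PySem

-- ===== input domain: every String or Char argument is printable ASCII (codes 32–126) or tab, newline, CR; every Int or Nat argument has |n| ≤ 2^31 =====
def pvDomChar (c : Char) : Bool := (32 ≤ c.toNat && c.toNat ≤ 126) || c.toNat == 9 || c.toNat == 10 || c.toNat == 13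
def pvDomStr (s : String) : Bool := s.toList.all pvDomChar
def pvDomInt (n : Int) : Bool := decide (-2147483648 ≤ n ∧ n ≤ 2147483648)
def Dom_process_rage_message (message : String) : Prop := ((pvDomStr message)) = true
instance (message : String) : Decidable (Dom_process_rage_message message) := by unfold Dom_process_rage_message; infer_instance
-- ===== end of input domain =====

-- B replaces A's index-driven nested while loops by a two-phase pass: tokenize into maximal
-- digit/non-digit runs, then fold once over the runs (objective: alternative decomposition).

-- ===== PORT A =====
-- inner 'while index < len(message) and message[index].isdigit()' loop: accumulates the digit
-- run into num (Python string concatenation = append on the char list) and returns the rest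
def pvTakeDigits : List Char → List Char → List Char × List Char
  | [], num => (num, [])
  | c :: rest, num =>
    if PySem.Chars.isdigit c then pvTakeDigits rest (num ++ [c]) else (num, c :: rest)

theorem pvTakeDigits_len (l : List Char) : ∀ acc, ((pvTakeDigits l acc).2).length ≤ l.length := by
  induction l with
  | nil => intro acc; simp [pvTakeDigits]
  | cons c rest ih =>
    intro acc
    by_cases h : PySem.Chars.isdigit c
    · simpa [pvTakeDigits, h] using Nat.le_succ_of_le (ih (acc ++ [c]))
    · simp [pvTakeDigits, h]

-- outer while loop; state = (unique_chars, rage_message, current_char_set as char list).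
-- In the digit branch the inner while's first iteration is unrolled (its guard is exactly the
-- outer 'if', already known true), so the inner loop continues as pvTakeDigits cs [c].
def pvALoop : List Char → PySem.Set String → PySem.Dict String Int → List Char →
    PySem.Set String × (List (String × Int))
  | [], u, r, _ => (u, r.items)
  | c :: cs, u, r, ccs =>
    if PySem.Chars.isdigit c then
      -- unreachable getD 0: the digit run is a nonempty digit string, int() cannot fail
      pvALoop (pvTakeDigits cs [c]).2 u
        (r.insert (String.ofList ccs) ((PySem.Int.ofStr? (String.ofList (pvTakeDigits cs [c]).1)).getD 0)) []
    else
      pvALoop cs (u.add (String.ofList [PySem.Chars.upperChar c])) r (ccs ++ [PySem.Chars.upperChar c])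
termination_by cs => cs.length
decreasing_by
  · exact Nat.lt_succ_of_le (pvTakeDigits_len cs [c])
  · exact Nat.lt_succ_self _

def process_rage_message (message : String) : List String × (List (String × Int)) :=
  pvALoop message.toList PySem.Set.empty PySem.Dict.empty []

-- ===== PORT B =====
-- _runs: one step of the tokenizing for-loop; state = (runs, cur as char list, cur_isd)
def pvTokStep (st : List (Bool × String) × List Char × Bool) (ch : Char) :
    List (Bool × String) × List Char × Bool :=
  match st with
  | (runs, cur, curIsd) =>
    let isd := PySem.Chars.isdigit ch
    if cur ≠ [] ∧ isd = curIsd then (runs, cur ++ [ch], curIsd)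
    else ((if cur ≠ [] then runs ++ [(curIsd, String.ofList cur)] else runs), [ch], isd)

-- _runs(message); cur_isd starts as None in Python but is only read when cur is nonempty,
-- so a dummy 'false' initial value is exact
def pvRuns (message : String) : List (Bool × String) :=
  match message.toList.foldl pvTokStep ([], [], false) with
  | (runs, cur, curIsd) => if cur ≠ [] then runs ++ [(curIsd, String.ofList cur)] else runs

-- one iteration of B's for-loop over the runs; state = (unique_chars, rage_message, key);
-- unique_chars.update(key) iterates the string's characters as 1-character strings
def pvBStep (st : PySem.Set String × PySem.Dict String Int × String) (t : Bool × String) :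
    PySem.Set String × PySem.Dict String Int × String :=
  match st, t with
  | (u, r, key), (isd, run) =>
    if isd then (u, r.insert key ((PySem.Int.ofStr? run).getD 0), "")
    else
      (u.update ((PySem.Str.upper run).toList.map (fun c => String.ofList [c])), r,
       PySem.Str.upper run)

def process_rage_message_alt (message : String) : List String × (List (String × Int)) :=
  match (pvRuns message).foldl pvBStep (PySem.Set.empty, PySem.Dict.empty, "") with
  | (u, r, _) => (u, r.items)

-- ===== PRECONDITION & SPEC =====
def Spec_process_rage_message (message : String) (out : List String × (List (String × Int))) : Prop := out = process_rage_message_alt message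
instance (message : String) (out : List String × (List (String × Int))) : Decidable (Spec_process_rage_message message out) := by unfold Spec_process_rage_message; infer_instance

-- ===== CLAIM (what is proved, stated in full; the proofs are below) =====
def Claim_equal_process_rage_message : Prop := ∀ (message : String), Dom_process_rage_message message → Spec_process_rage_message message (process_rage_message message)

-- ===== LEMMAS AND PROOFS =====

-- unfolding equations for the well-founded pvALoop
theorem pvALoop_nil (u : PySem.Set String) (r : PySem.Dict String Int) (ccs : List Char) :
    pvALoop [] u r ccs = (u, r.items) := by rw [pvALoop]

theorem pvALoop_digit {c : Char} (h : PySem.Chars.isdigit c = true) (cs : List Char)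
    (u : PySem.Set String) (r : PySem.Dict String Int) (ccs : List Char) :
    pvALoop (c :: cs) u r ccs =
      pvALoop (pvTakeDigits cs [c]).2 u
        (r.insert (String.ofList ccs)
          ((PySem.Int.ofStr? (String.ofList (pvTakeDigits cs [c]).1)).getD 0)) [] := by
  rw [pvALoop]; simp [h]

theorem pvALoop_nondigit {c : Char} (h : PySem.Chars.isdigit c = false) (cs : List Char)
    (u : PySem.Set String) (r : PySem.Dict String Int) (ccs : List Char) :
    pvALoop (c :: cs) u r ccs =
      pvALoop cs (u.add (String.ofList [PySem.Chars.upperChar c])) r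
        (ccs ++ [PySem.Chars.upperChar c]) := by
  rw [pvALoop]; simp [h]

-- extract B's result pair from its loop state
def pvFinish (st : PySem.Set String × PySem.Dict String Int × String) :
    List String × (List (String × Int)) := (st.1, st.2.1.items)

theorem pvAlt_eq (message : String) :
    process_rage_message_alt message =
      pvFinish ((pvRuns message).foldl pvBStep (PySem.Set.empty, PySem.Dict.empty, "")) := by
  unfold process_rage_message_alt
  rcases hx : (pvRuns message).foldl pvBStep (PySem.Set.empty, PySem.Dict.empty, "") with ⟨u, r, k⟩
  simp [pvFinish]

-- the runs that B's tokenizer produces, in the recursive shape the proof inducts over: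
-- the maximal group of class b whose scanned prefix is cur, followed by the groups of the rest
def pvGroup (b : Bool) (cur : List Char) : List Char → List (Bool × String)
  | [] => [(b, String.ofList cur)]
  | c :: rest =>
    if PySem.Chars.isdigit c = b then pvGroup b (cur ++ [c]) rest
    else (b, String.ofList cur) :: pvGroup (PySem.Chars.isdigit c) [c] rest

theorem pvTok_group (cs : List Char) : ∀ (runs : List (Bool × String)) (cur : List Char) (b : Bool),
    cur ≠ [] →
    (match List.foldl pvTokStep (runs, cur, b) cs with
     | (rs, c2, b2) => if c2 ≠ [] then rs ++ [(b2, String.ofList c2)] else rs)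
      = runs ++ pvGroup b cur cs := by
  induction cs with
  | nil => intro runs cur b hc; simp [pvGroup, hc]
  | cons c rest ih =>
    intro runs cur b hc
    by_cases h : PySem.Chars.isdigit c = b
    · simpa [pvTokStep, pvGroup, hc, h] using ih runs (cur ++ [c]) b (by simp)
    · have := ih (runs ++ [(b, String.ofList cur)]) [c] (PySem.Chars.isdigit c) (by simp)
      simp [pvTokStep, pvGroup, hc, h] at this ⊢
      simp [this]

theorem pvRuns_eq (c : Char) (rest : List Char) (s : String) (h : s.toList = c :: rest) :
    pvRuns s = pvGroup (PySem.Chars.isdigit c) [c] rest := by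
  have := pvTok_group rest [] [c] (PySem.Chars.isdigit c) (by simp)
  simp [pvRuns, h, pvTokStep]
  simpa using this

-- the upper-cased run, as B computes it, in A's char-by-char form
theorem pvUpper_ofList (cur : List Char) :
    PySem.Str.upper (String.ofList cur) = String.ofList (cur.map PySem.Chars.upperChar) := by
  simp [PySem.Str.upper, PySem.Chars.upper]

-- the main invariant: A's continuation from the middle of a maximal run of class b equals
-- B's fold over the remaining runs
theorem pvMain (cs : List Char) : ∀ (b : Bool) (cur : List Char)
    (u : PySem.Set String) (r : PySem.Dict String Int) (key : String),
    cur ≠ [] →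
    (if b then
      pvALoop (pvTakeDigits cs cur).2 u
        (r.insert key ((PySem.Int.ofStr? (String.ofList (pvTakeDigits cs cur).1)).getD 0)) []
     else
      pvALoop cs (u.update (cur.map (fun c => String.ofList [PySem.Chars.upperChar c]))) r
        (cur.map PySem.Chars.upperChar))
    = pvFinish ((pvGroup b cur cs).foldl pvBStep (u, r, key)) := by
  induction cs with
  | nil =>
    intro b cur u r key hc
    cases b
    · simp [pvGroup, pvBStep, pvALoop_nil, pvFinish, pvUpper_ofList, PySem.Set.update,
        List.map_map, Function.comp_def]
    · simp [pvGroup, pvTakeDigits, pvBStep, pvALoop_nil, pvFinish]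
  | cons c rest ih =>
    intro b cur u r key hc
    cases b
    · by_cases h : PySem.Chars.isdigit c
      · -- non-digit run ends, digit run of head c begins
        rw [if_neg (by simp)]
        rw [pvALoop_digit h rest]
        have hmain := ih true [c]
          (u.update (cur.map (fun x => String.ofList [PySem.Chars.upperChar x]))) r
          (String.ofList (cur.map PySem.Chars.upperChar)) (by simp)
        rw [if_pos rfl] at hmain
        rw [hmain]
        simp only [pvGroup, h, Bool.true_eq_false, if_false, List.foldl_cons]
        congr 1
        simp [pvBStep, pvUpper_ofList, PySem.Set.update, List.map_map, Function.comp_def]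
      · -- non-digit run continues
        simp only [Bool.not_eq_true] at h
        rw [if_neg (by simp)]
        rw [pvALoop_nondigit h rest]
        have hmain := ih false (cur ++ [c]) u r key (by simp)
        rw [if_neg (by simp)] at hmain
        simp only [pvGroup, h, if_true]
        rw [← hmain]
        simp [PySem.Set.update_append, PySem.Set.update_cons, PySem.Set.update_nil]
    · by_cases h : PySem.Chars.isdigit c
      · -- digit run continues
        rw [if_pos rfl]
        have hmain := ih true (cur ++ [c]) u r key (by simp)
        rw [if_pos rfl] at hmain
        simp only [pvGroup, h, if_true]
        rw [← hmain]
        simp [pvTakeDigits, h]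
      · -- digit run ends, non-digit run of head c begins
        simp only [Bool.not_eq_true] at h
        rw [if_pos rfl]
        have htd : pvTakeDigits (c :: rest) cur = (cur, c :: rest) := by
          simp [pvTakeDigits, h]
        rw [htd]
        rw [pvALoop_nondigit h rest]
        have hmain := ih false [c] u
          (r.insert key ((PySem.Int.ofStr? (String.ofList cur)).getD 0)) "" (by simp)
        rw [if_neg (by simp)] at hmain
        rw [show pvGroup true cur (c :: rest) = (true, String.ofList cur) :: pvGroup false [c] rest
          from by simp [pvGroup, h]]
        rw [List.foldl_cons]
        rw [show pvBStep (u, r, key) (true, String.ofList cur)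
            = (u, r.insert key ((PySem.Int.ofStr? (String.ofList cur)).getD 0), "")
          from by simp [pvBStep]]
        rw [← hmain]
        simp [PySem.Set.update]

theorem process_rage_message_spec : Claim_equal_process_rage_message := by
  intro message _
  unfold Spec_process_rage_message
  rw [pvAlt_eq]
  unfold process_rage_message
  cases hm : message.toList with
  | nil =>
    have : pvRuns message = [] := by simp [pvRuns, hm]
    rw [this]
    simp [pvALoop_nil, pvFinish]
  | cons c rest =>
    rw [pvRuns_eq c rest message hm]
    by_cases h : PySem.Chars.isdigit c
    · rw [pvALoop_digit h rest]
      have hmain := pvMain rest true [c] PySem.Set.empty PySem.Dict.empty "" (by simp)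
      rw [if_pos rfl] at hmain
      rw [h] at *
      convert hmain using 3
    · simp only [Bool.not_eq_true] at h
      rw [pvALoop_nondigit h rest]
      have hmain := pvMain rest false [c] PySem.Set.empty PySem.Dict.empty "" (by simp)
      rw [if_neg (by simp)] at hmain
      rw [h]
      rw [← hmain]
      simp [PySem.Set.update]
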